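-- pv_equiv track=rewrite | github.com/sojiomiwade/supreme-train | archive-pre-google/word_count_engine.py | word_count_engine
-- ===== SOURCE A (Python) =====
-- import collections
--
-- def word_count_engine(document):
--   doc=''.join(ch for ch in document.lower() if ch==' ' or ch.isalnum())
--   splitdoc=doc.split()
--   orig_ord={}
--   for i,word in enumerate(splitdoc):
--     orig_ord.setdefault(word,i)
--   count=collections.Counter(splitdoc)
--   words=list(count.items())
--   aux=sorted(words,key=lambda x: (-x[1],orig_ord[x[0]]))
--   ans=[[s,str(freq)] for s,freq in aux]
--   return ans
-- ===== SOURCE B (Python) =====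
-- def word_count_engine(document):
--   doc = ''.join(ch for ch in document.lower() if ch == ' ' or ch.isalnum())
--   counts = {}
--   for w in doc.split():
--     counts[w] = counts.get(w, 0) + 1
--   buckets = {}
--   maxf = 0
--   for w, c in counts.items():
--     if c > maxf:
--       maxf = c
--     buckets.setdefault(c, []).append(w)
--   out = []
--   for c in range(maxf, 0, -1):
--     for w in buckets.get(c, []):
--       out.append([w, str(c)])
--   return out
-- ===== Notes on version B (the rewrite author's own statement) =====
-- stated objective: alternative
-- what changed: Replaces the comparison sort with the (-frequency, first-occurrence) tuple key (and the auxiliary first-index dict it needs) by a counting sort: words are bucketed by frequency in dict-insertion (= first-occurrence) order and the buckets are emitted from the maximum frequency down.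
import Mathlib
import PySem

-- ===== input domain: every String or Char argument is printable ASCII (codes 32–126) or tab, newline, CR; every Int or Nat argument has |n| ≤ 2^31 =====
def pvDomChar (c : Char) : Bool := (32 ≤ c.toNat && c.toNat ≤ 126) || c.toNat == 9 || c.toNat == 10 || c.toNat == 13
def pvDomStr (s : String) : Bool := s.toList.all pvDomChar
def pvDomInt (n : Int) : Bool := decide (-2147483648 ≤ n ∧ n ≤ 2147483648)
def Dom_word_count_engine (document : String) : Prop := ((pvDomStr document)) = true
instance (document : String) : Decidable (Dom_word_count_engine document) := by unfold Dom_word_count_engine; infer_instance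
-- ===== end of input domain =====

-- B replaces A's comparison sort by (-freq, first-occurrence) with a counting-sort: words bucketed by
-- frequency in first-occurrence (dict-insertion) order, buckets emitted from max frequency down (alternative algorithm).

-- ===== PORT A =====
def word_count_engine (document : String) : List (List String) :=
  let doc : List Char :=
    (PySem.Chars.lower document.toList).filter (fun ch => ch == ' ' || PySem.Chars.isalnum ch)
  let splitdoc : List (List Char) := PySem.Chars.split₀ doc
  let origOrd : PySem.Dict (List Char) Int :=
    (PySem.List.enumerate splitdoc).foldl (fun d p => d.setdefault p.2 p.1) PySem.Dict.empty
  let count : PySem.Dict (List Char) Int := PySem.Dict.counter splitdoc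
  let words := count.items
  -- orig_ord[x[0]]: the key is always present (every counted word was enumerated), so getD is exact here
  let aux := PySem.List.sorted2 words (fun x => -x.2) (fun x => origOrd.getD x.1 0)
  aux.map (fun p => [String.ofList p.1, PySem.Int.toStr p.2])

-- ===== PORT B =====
def word_count_engine_alt (document : String) : List (List String) :=
  let doc : List Char :=
    (PySem.Chars.lower document.toList).filter (fun ch => ch == ' ' || PySem.Chars.isalnum ch)
  let counts : PySem.Dict (List Char) Int :=
    (PySem.Chars.split₀ doc).foldl (fun d w => d.insert w (d.getD w 0 + 1)) PySem.Dict.empty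
  -- buckets.setdefault(c, []).append(w)  ==  buckets[c] = buckets.get(c, []) + [w]  == Dict.modify
  let st : PySem.Dict Int (List (List Char)) × Int :=
    counts.items.foldl (fun s p =>
      (s.1.modify p.2 [] (fun b => b ++ [p.1]), if p.2 > s.2 then p.2 else s.2))
      (PySem.Dict.empty, 0)
  (PySem.List.pyRange st.2 0 (-1)).foldl (fun out c =>
    out ++ (st.1.getD c []).map (fun w => [String.ofList w, PySem.Int.toStr c])) []

-- ===== PRECONDITION & SPEC =====
def Spec_word_count_engine (document : String) (out : List (List String)) : Prop := out = word_count_engine_alt document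
instance (document : String) (out : List (List String)) : Decidable (Spec_word_count_engine document out) := by unfold Spec_word_count_engine; infer_instance

-- ===== CLAIM (what is proved, stated in full; the proofs are below) =====
def Claim_equal_word_count_engine : Prop := ∀ (document : String), Dom_word_count_engine document → Spec_word_count_engine document (word_count_engine document)

-- ===== LEMMAS AND PROOFS =====

-- invariant for A's orig_ord fold (setdefault over enumerate)
theorem pv_setdefault_fold (ws : List (List Char)) :
    ∀ (n : Int) (d : PySem.Dict (List Char) Int), 0 ≤ n →
    d.keys.Nodup → d.items.Pairwise (fun p q => p.2 < q.2) → (∀ p ∈ d.items, 0 ≤ p.2 ∧ p.2 < n) →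
    ((PySem.List.enumerate ws n).foldl (fun d p => d.setdefault p.2 p.1) d).keys
        = PySem.Set.update d.keys ws ∧
    ((PySem.List.enumerate ws n).foldl (fun d p => d.setdefault p.2 p.1) d).keys.Nodup ∧
    ((PySem.List.enumerate ws n).foldl (fun d p => d.setdefault p.2 p.1) d).items.Pairwise (fun p q => p.2 < q.2) ∧
    (∀ p ∈ ((PySem.List.enumerate ws n).foldl (fun d p => d.setdefault p.2 p.1) d).items,
        0 ≤ p.2 ∧ p.2 < n + ws.length) := by
  induction ws with
  | nil =>
    intro n d _ h1 h2 h3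
    simp only [PySem.List.enumerate_nil, List.foldl_nil, List.length_nil]
    exact ⟨rfl, h1, h2, by simpa using h3⟩
  | cons w t ih =>
    intro n d hn h1 h2 h3
    rw [PySem.List.enumerate_cons, List.foldl_cons]
    by_cases hc : d.contains w
    · have hsd : d.setdefault w n = d := PySem.Dict.setdefault_of_contains d n hc
      simp only [hsd]
      obtain ⟨k1, k2, k3, k4⟩ := ih (n+1) d (by omega) h1 h2
        (fun p hp => by have := h3 p hp; omega)
      refine ⟨?_, k2, k3, fun p hp => by have := k4 p hp; simp only [List.length_cons]; omega⟩
      rw [k1]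
      unfold PySem.Set.update
      rw [List.foldl_cons]
      congr 1
      unfold PySem.Set.add
      rw [if_pos]
      rw [show PySem.Set.contains d.keys w = List.contains d.keys w from rfl, List.contains_eq_mem ..]
      rw [PySem.Dict.contains_eq_decide_mem_keys] at hc
      simpa using hc
    · have hc' : d.contains w = false := by simpa using hc
      have hsd : d.setdefault w n = d.insert w n := PySem.Dict.setdefault_of_not_contains d n hc'
      have hit : (d.insert w n).items = d.items ++ [(w, n)] :=
        PySem.Dict.items_insert_of_not_contains d n hc'
      have hwk : ¬ w ∈ d.keys := by
        rw [PySem.Dict.contains_eq_decide_mem_keys] at hc'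
        simpa using hc'
      have hkeys : (d.insert w n).keys = d.keys ++ [w] := by
        show (d.insert w n).items.map Prod.fst = _
        rw [hit]; simp [PySem.Dict.keys]
      obtain ⟨k1, k2, k3, k4⟩ := ih (n+1) (d.insert w n) (by omega)
        (by rw [hkeys]
            refine List.Nodup.append h1 (List.nodup_singleton w) ?_
            intro a ha hb
            simp only [List.mem_singleton] at hb
            subst hb; exact hwk ha)
        (by rw [hit]
            refine List.pairwise_append.2 ⟨h2, by simp, ?_⟩
            intro p hp q hq
            have := h3 p hp
            simp at hq
            rw [hq]; omega)
        (by rw [hit]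
            intro p hp
            rcases List.mem_append.1 hp with h | h
            · have := h3 p h; omega
            · simp at h; rw [h]; simp; omega)
      simp only [hsd]
      refine ⟨?_, k2, k3, fun p hp => by have := k4 p hp; simp only [List.length_cons]; omega⟩
      rw [k1, hkeys]
      unfold PySem.Set.update
      rw [List.foldl_cons]
      congr 1
      unfold PySem.Set.add
      rw [if_neg]
      rw [show PySem.Set.contains d.keys w = List.contains d.keys w from rfl, List.contains_eq_mem ..]
      simpa using hwk

theorem pv_ord_facts (ws : List (List Char)) :
    ((PySem.List.enumerate ws 0).foldl (fun d p => d.setdefault p.2 p.1) PySem.Dict.empty).keys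
      = PySem.Set.ofList ws ∧
    (PySem.Set.ofList ws).Pairwise (fun a b =>
      ((PySem.List.enumerate ws 0).foldl (fun d p => d.setdefault p.2 p.1) PySem.Dict.empty).getD a 0 <
      ((PySem.List.enumerate ws 0).foldl (fun d p => d.setdefault p.2 p.1) PySem.Dict.empty).getD b 0) ∧
    (∀ w ∈ PySem.Set.ofList ws,
      0 ≤ ((PySem.List.enumerate ws 0).foldl (fun d p => d.setdefault p.2 p.1) PySem.Dict.empty).getD w 0 ∧
      ((PySem.List.enumerate ws 0).foldl (fun d p => d.setdefault p.2 p.1) PySem.Dict.empty).getD w 0 < (ws.length : Int)) := by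
  obtain ⟨k1, k2, k3, k4⟩ := pv_setdefault_fold ws 0 PySem.Dict.empty le_rfl
    (by simp [PySem.Dict.keys_empty]) (by simp [PySem.Dict.empty]) (by simp [PySem.Dict.empty])
  set r := (PySem.List.enumerate ws 0).foldl (fun d p => d.setdefault p.2 p.1) PySem.Dict.empty with hr
  have hkeys : r.keys = PySem.Set.ofList ws := by
    rw [k1, PySem.Set.ofList_eq_foldl, PySem.Dict.keys_empty]
    rfl
  have hkm : r.keys = r.items.map Prod.fst := rfl
  have hgetD : ∀ p ∈ r.items, r.getD p.1 0 = p.2 := by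
    intro p hp
    exact PySem.Dict.getD_of_mem_items r (by simpa using hp) k2 0
  refine ⟨hkeys, ?_, ?_⟩
  · rw [← hkeys, hkm, List.pairwise_map]
    refine k3.imp_of_mem ?_
    intro p q hp hq h
    rw [hgetD p hp, hgetD q hq]; exact h
  · intro w hw
    rw [← hkeys, hkm] at hw
    obtain ⟨p, hp, hpw⟩ := List.mem_map.1 hw
    rw [← hpw, hgetD p hp]
    have := k4 p hp
    simp at this
    omega

theorem pv_bucket_getD (l : List (List Char × Int)) :
    ∀ (d : PySem.Dict Int (List (List Char))) (c : Int),
    (l.foldl (fun d p => d.modify p.2 [] (fun b => b ++ [p.1])) d).getD c []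
      = d.getD c [] ++ (l.filter (fun p => p.2 == c)).map Prod.fst := by
  induction l with
  | nil => intro d c; simp
  | cons p t ih =>
    intro d c
    rw [List.foldl_cons, ih]
    by_cases hc : p.2 = c
    · subst hc
      rw [PySem.Dict.getD_modify]
      simp
    · rw [PySem.Dict.getD_modify, if_neg (fun h => hc h.symm)]
      have hb : (p.2 == c) = false := by simpa using hc
      simp [hb]

theorem pv_perm_flatMap_filter {α : Type} (cs : List Int) :
    ∀ (l : List (α × Int)), cs.Nodup → (∀ p ∈ l, p.2 ∈ cs) →
    (cs.flatMap (fun c => l.filter (fun p => p.2 == c))).Perm l := by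
  induction cs with
  | nil =>
    intro l _ h
    have : l = [] := by
      cases l with
      | nil => rfl
      | cons x t => exact absurd (h x (by simp)) (by simp)
    simp [this]
  | cons c cs' ih =>
    intro l hnd hmem
    rw [List.flatMap_cons]
    have hrw : cs'.flatMap (fun c' => l.filter (fun p => p.2 == c'))
        = cs'.flatMap (fun c' => (l.filter (fun p => !(p.2 == c))).filter (fun p => p.2 == c')) := by
      refine (List.flatMap_congr ?_).symm
      intro c' hc'
      rw [List.filter_filter]
      refine List.filter_congr ?_
      intro p _
      by_cases h : p.2 = c'
      · have hne : c' ≠ c := fun he => (List.nodup_cons.1 hnd).1 (he ▸ hc')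
        simp only [h, beq_iff_eq, Bool.and_eq_left_iff_imp, Bool.not_eq_eq_eq_not, Bool.not_true]
        intro _; exact beq_false_of_ne hne
      · simp [h]
    rw [hrw]
    have hperm' : (cs'.flatMap (fun c' => (l.filter (fun p => !(p.2 == c))).filter (fun p => p.2 == c'))).Perm
        (l.filter (fun p => !(p.2 == c))) := by
      refine ih _ (List.nodup_cons.1 hnd).2 ?_
      intro p hp
      have h1 := List.mem_filter.1 hp
      have := hmem p h1.1
      simp only [List.mem_cons] at this
      rcases this with h | h
      · exfalso; have := h1.2; simp [h] at this
      · exact h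
    exact (hperm'.append_left _).trans (List.filter_append_perm _ l)

theorem pv_lex_key (N x y ox oy : Int) (hN : 0 < N) (h1 : 0 ≤ ox) (h2 : ox < N)
    (h3 : 0 ≤ oy) (h4 : oy < N) :
    x * N + ox < y * N + oy ↔ (x < y ∨ (x = y ∧ ox < oy)) := by
  constructor
  · intro h
    rcases lt_trichotomy x y with hxy | hxy | hxy
    · exact Or.inl hxy
    · exact Or.inr ⟨hxy, by rw [hxy] at h; omega⟩
    · exfalso
      have hm : (y + 1) * N ≤ x * N := mul_le_mul_of_nonneg_right (by omega) hN.le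
      nlinarith
  · intro h
    rcases h with h | ⟨h, h'⟩
    · have hm : (x + 1) * N ≤ y * N := mul_le_mul_of_nonneg_right (by omega) hN.le
      nlinarith
    · rw [h]; omega

theorem pv_insertBy_congr {α : Type} (f g : α → α → Bool) (x : α) (acc : List α)
    (h : ∀ b ∈ acc, f x b = g x b) : PySem.List.insertBy f x acc = PySem.List.insertBy g x acc := by
  induction acc with
  | nil => rfl
  | cons y ys ih =>
    rw [show PySem.List.insertBy f x (y :: ys) = if f x y then x :: y :: ys else y :: PySem.List.insertBy f x ys from by simp [PySem.List.insertBy],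
        show PySem.List.insertBy g x (y :: ys) = if g x y then x :: y :: ys else y :: PySem.List.insertBy g x ys from by simp [PySem.List.insertBy]]
    rw [h y (by simp)]
    split
    · rfl
    · rw [ih (fun b hb => h b (by simp [hb]))]

theorem pv_foldl_insertBy_congr {α : Type} (f g : α → α → Bool) (whole : List α) :
    ∀ (l acc : List α), (∀ x ∈ l, x ∈ whole) → (∀ x ∈ acc, x ∈ whole) →
    (∀ a b, a ∈ whole → b ∈ whole → f a b = g a b) →
    l.foldl (fun acc x => PySem.List.insertBy f x acc) acc = l.foldl (fun acc x => PySem.List.insertBy g x acc) acc := by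
  intro l
  induction l with
  | nil => intro acc _ _ _; rfl
  | cons x t ih =>
    intro acc hl hacc h
    simp only [List.foldl_cons]
    rw [pv_insertBy_congr f g x acc (fun b hb => h x b (hl x (by simp)) (hacc b hb))]
    exact ih _ (fun y hy => hl y (by simp [hy]))
      (fun y hy => by
        rcases (PySem.List.mem_insertBy g x y acc).1 hy with h1 | h1
        · exact h1 ▸ hl x (by simp)
        · exact hacc y h1) h

theorem pv_main (ws : List (List Char)) :
    (PySem.List.sorted2
        (PySem.Dict.counter ws).items (fun x => -x.2)
        (fun x => ((PySem.List.enumerate ws).foldl (fun d p => d.setdefault p.2 p.1)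
          PySem.Dict.empty).getD x.1 0)).map
        (fun p => [String.ofList p.1, PySem.Int.toStr p.2]) =
    (PySem.List.pyRange
        (((PySem.Dict.counter ws).items.foldl (fun s p =>
            (s.1.modify p.2 [] (fun b => b ++ [p.1]), if p.2 > s.2 then p.2 else s.2))
          ((PySem.Dict.empty : PySem.Dict Int (List (List Char))), 0)).2) 0 (-1)).foldl
      (fun out c => out ++
        ((((PySem.Dict.counter ws).items.foldl (fun s p =>
            (s.1.modify p.2 [] (fun b => b ++ [p.1]), if p.2 > s.2 then p.2 else s.2))
          ((PySem.Dict.empty : PySem.Dict Int (List (List Char))), 0)).1).getD c []).map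
          (fun w => [String.ofList w, PySem.Int.toStr c])) [] := by
  have hitems := PySem.Dict.items_counter ws
  rw [hitems]
  set O : PySem.Dict (List Char) Int :=
    (PySem.List.enumerate ws 0).foldl (fun d p => d.setdefault p.2 p.1) PySem.Dict.empty with hO
  set L : List (List Char × Int) :=
    (PySem.Set.ofList ws).map (fun k => (k, (List.count k ws : Int))) with hLdef
  obtain ⟨hOK, hOP, hOB⟩ := pv_ord_facts ws
  rw [← hO] at hOP hOB
  -- split the B-side pair fold into two independent folds
  rw [PySem.List.foldl_prod_mk
    (f := fun (d : PySem.Dict Int (List (List Char))) (p : List Char × Int) => d.modify p.2 [] (fun b => b ++ [p.1]))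
    (g := fun (m : Int) (p : List Char × Int) => if p.2 > m then p.2 else m)]
  set M : Int := L.foldl (fun m p => if p.2 > m then p.2 else m) 0 with hM
  -- facts about L
  have hmemL : ∀ p ∈ L, p.1 ∈ PySem.Set.ofList ws ∧ p.2 = (List.count p.1 ws : Int) := by
    intro p hp
    obtain ⟨k, hk, rfl⟩ := List.mem_map.1 hp
    exact ⟨hk, rfl⟩
  have hpos : ∀ p ∈ L, 1 ≤ p.2 := by
    intro p hp
    obtain ⟨h1, h2⟩ := hmemL p hp
    have : p.1 ∈ ws := (PySem.Set.mem_ofList ws p.1).1 h1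
    have := List.count_pos_iff.2 this
    omega
  have hordb : ∀ p ∈ L, 0 ≤ O.getD p.1 0 ∧ O.getD p.1 0 < (ws.length : Int) := by
    intro p hp
    exact hOB p.1 (hmemL p hp).1
  have hMfacts : (∀ p ∈ L, p.2 ≤ M) ∧ 0 ≤ M := by
    have hrw : M = L.foldl (fun m p => max m p.2) 0 := by
      rw [hM]
      exact PySem.List.foldl_congr_mem L _ _ 0
        (fun acc x _ => by rw [max_def]; split_ifs <;> omega)
    have h := PySem.List.le_foldl_max_int L (fun p => p.2) 0
    rw [hrw]
    exact ⟨h.2, h.1⟩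
  set N : Int := (ws.length : Int) + 1 with hN
  set K : List Char × Int → Int := fun p => (-p.2) * N + O.getD p.1 0 with hK
  have hKiff : ∀ a b, a ∈ L → b ∈ L →
      ((decide ((-a.2 : Int) < -b.2)) || (!decide ((-b.2 : Int) < -a.2) && decide (O.getD a.1 0 < O.getD b.1 0)))
        = decide (K a < K b) := by
    intro a b ha hb
    have hba := hordb a ha
    have hbb := hordb b hb
    rw [Bool.eq_iff_iff]
    simp only [Bool.or_eq_true, Bool.and_eq_true, Bool.not_eq_true', decide_eq_true_eq,
      decide_eq_false_iff_not, hK]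
    rw [pv_lex_key N (-a.2) (-b.2) (O.getD a.1 0) (O.getD b.1 0) (by omega) hba.1 (by omega) hbb.1 (by omega)]
    omega
  -- A's sort = sort by the single combined key K
  have hA : PySem.List.sorted2 L (fun x => -x.2) (fun x => O.getD x.1 0)
      = PySem.List.sorted L K := by
    have h0 : PySem.List.sorted2 L (fun x => -x.2) (fun x => O.getD x.1 0)
        = L.foldl (fun acc x => PySem.List.insertBy
            (fun a b => decide ((-a.2 : Int) < -b.2) || (!decide ((-b.2 : Int) < -a.2) && decide (O.getD a.1 0 < O.getD b.1 0)))
            x acc) [] := rfl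
    rw [h0, PySem.List.sorted_eq_foldl_insertBy]
    exact pv_foldl_insertBy_congr _ _ L L [] (fun x h => h) (by simp)
      (fun a b ha hb => hKiff a b ha hb)
  -- the bucket concatenation
  set bs : List (List Char × Int) :=
    (PySem.List.pyRange M 0 (-1)).flatMap (fun c => L.filter (fun p => p.2 == c)) with hbs
  have hperm : bs.Perm L := by
    refine pv_perm_flatMap_filter _ L ?_ ?_
    · rw [PySem.List.pyRange_neg_one_eq_reverse]
      exact List.nodup_reverse.2 (PySem.List.nodup_pyRange_one _ _)
    · intro p hp
      refine PySem.List.mem_pyRange_neg_one.2 ⟨?_, hMfacts.1 p hp⟩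
      have := hpos p hp; omega
  have hLP : L.Pairwise (fun p q => O.getD p.1 0 < O.getD q.1 0) :=
    List.pairwise_map.2 hOP
  have hrange : (PySem.List.pyRange M 0 (-1)).Pairwise (fun c1 c2 => c2 < c1) := by
    rw [PySem.List.pyRange_neg_one_eq_reverse]
    exact List.pairwise_reverse.2 (PySem.List.pairwise_lt_pyRange_one _ _)
  have hpair : bs.Pairwise (fun a b => K a < K b) := by
    rw [hbs, List.flatMap_def]
    refine List.pairwise_flatten.2 ⟨?_, ?_⟩
    · intro l' hl'
      obtain ⟨c, _, rfl⟩ := List.mem_map.1 hl'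
      refine ((hLP.sublist List.filter_sublist).imp_of_mem ?_)
      intro p q hp hq hord
      have hpc : p.2 = c := by simpa using (List.mem_filter.1 hp).2
      have hqc : q.2 = c := by simpa using (List.mem_filter.1 hq).2
      show K p < K q
      rw [hK]
      simp only [hpc, hqc]
      omega
    · rw [List.pairwise_map]
      refine hrange.imp_of_mem ?_
      intro c1 c2 _ _ hlt x hx y hy
      have hxL := (List.mem_filter.1 hx).1
      have hyL := (List.mem_filter.1 hy).1
      have hx2 : x.2 = c1 := by simpa using (List.mem_filter.1 hx).2
      have hy2 : y.2 = c2 := by simpa using (List.mem_filter.1 hy).2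
      have hb1 := hordb x hxL
      have hb2 := hordb y hyL
      have hNpos : (0 : Int) < N := by rw [hN]; omega
      have hm : (c2 + 1) * N ≤ c1 * N :=
        mul_le_mul_of_nonneg_right (by omega) hNpos.le
      show K x < K y
      rw [hK]
      simp only [hx2, hy2]
      nlinarith [hb1.1, hb1.2, hb2.1, hb2.2]
  have hsorted : PySem.List.sorted L K = bs :=
    PySem.List.sorted_eq_of_perm_of_pairwise_lt L bs K hperm hpair
  rw [hA, hsorted, PySem.List.foldl_append_eq_flatMap, List.nil_append, hbs,
    List.map_flatMap]
  refine List.flatMap_congr ?_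
  intro c _
  rw [pv_bucket_getD, PySem.Dict.getD_empty, List.nil_append, List.map_map]
  refine List.map_congr_left ?_
  intro p hp
  have hpc : p.2 = c := by simpa using (List.mem_filter.1 hp).2
  simp [hpc]

-- ===== VERDICT (by name: the statement is the Claim_ definition above) =====
theorem word_count_engine_spec : Claim_equal_word_count_engine := by
  intro document _
  unfold Spec_word_count_engine word_count_engine word_count_engine_alt
  exact pv_main _
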